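-- pv_equiv track=rewrite | github.com/IHateChem/Algo_practice | 프로그래머스/3/258709. 주사위 고르기/주사위 고르기.py | calc
-- ===== SOURCE A (Python) =====
-- from collections import defaultdict as dd
--
-- def calc(A, B):
--     p_a = {0:1}
--     p_b = {0:1}
--     ret = [0, 0, 0]
--     for a in A:
--         t = dd(int)
--         for ka, va in a.items():
--             for k, v in p_a.items():
--                 t[ka+k] += v*va
--         p_a = t
--     for b in B:
--         t = dd(int)
--         for ka, va in b.items():
--             for k, v in p_b.items():
--                 t[ka+k] += v*va
--         p_b = t
--     for ka, va in p_a.items():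
--         for kb, vb in p_b.items():
--             if ka == kb:
--                 ret[1] += va* vb
--             elif ka > kb:
--                 ret[0] += va * vb
--             else:
--                 ret[2] += va* vb
--     return ret
-- ===== SOURCE B (Python) =====
-- def calc(A, B):
--     def dist(dice):
--         p = {0: 1}
--         for d in dice:
--             t = {}
--             for ka, va in d.items():
--                 for k, v in p.items():
--                     t[ka + k] = t.get(ka + k, 0) + v * va
--             p = t
--         return p
--
--     pa = dist(A)
--     pb = dist(B)
--     ia = sorted(pa.items(), key=lambda kv: kv[0])
--     ib = sorted(pb.items(), key=lambda kv: kv[0])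
--     wins = ties = 0
--     below = 0
--     j = 0
--     for ka, va in ia:
--         while j < len(ib) and ib[j][0] < ka:
--             below += ib[j][1]
--             j += 1
--         wins += va * below
--         if j < len(ib) and ib[j][0] == ka:
--             ties += va * ib[j][1]
--     total = sum(pa.values()) * sum(pb.values())
--     return [wins, ties, total - wins - ties]
-- ===== Notes on version B (the rewrite author's own statement) =====
-- stated objective: faster
-- what changed: The final all-pairs comparison of the two sum distributions (O(Sa*Sb) nested loops) is replaced by sorting both distributions' items and a single two-pointer merge sweep that accumulates wins via a running prefix sum and ties via the pointer head, with losses derived from the total product of counts; the convolution is factored into a dist helper using a plain dict instead of defaultdict.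
import Mathlib
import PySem

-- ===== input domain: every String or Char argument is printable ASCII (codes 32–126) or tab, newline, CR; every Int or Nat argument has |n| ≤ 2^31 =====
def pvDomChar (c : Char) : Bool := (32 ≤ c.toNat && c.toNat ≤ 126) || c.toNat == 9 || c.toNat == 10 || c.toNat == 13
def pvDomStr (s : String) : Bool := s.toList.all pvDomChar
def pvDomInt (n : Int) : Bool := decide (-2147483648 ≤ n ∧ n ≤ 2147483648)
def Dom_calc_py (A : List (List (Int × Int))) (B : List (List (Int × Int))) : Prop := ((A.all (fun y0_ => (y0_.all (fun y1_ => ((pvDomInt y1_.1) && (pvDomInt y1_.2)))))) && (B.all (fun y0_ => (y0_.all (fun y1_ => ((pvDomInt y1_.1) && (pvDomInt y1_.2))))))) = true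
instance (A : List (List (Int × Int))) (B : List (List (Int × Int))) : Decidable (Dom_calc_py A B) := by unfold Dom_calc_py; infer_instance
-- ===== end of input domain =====

-- B replaces A's quadratic all-pairs comparison of the two sum distributions by sorting
-- the distributions' items and a single two-pointer sweep, deriving losses from the total product.

-- ===== PORT A =====
-- Transliteration of A: convolution via defaultdict (modify), then the O(|p_a|·|p_b|)
-- pairwise comparison loop accumulating into ret = [wins, ties, losses].
def calc_py (A : List (List (Int × Int))) (B : List (List (Int × Int))) : List Int :=
  let p_a := A.foldl (fun p a =>
    (PySem.Dict.ofList a).items.foldl (fun t kv =>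
      p.items.foldl (fun t kv2 => t.modify (kv.1 + kv2.1) 0 (fun w => w + kv2.2 * kv.2)) t)
      PySem.Dict.empty) (PySem.Dict.empty.insert 0 1)
  let p_b := B.foldl (fun p b =>
    (PySem.Dict.ofList b).items.foldl (fun t kv =>
      p.items.foldl (fun t kv2 => t.modify (kv.1 + kv2.1) 0 (fun w => w + kv2.2 * kv.2)) t)
      PySem.Dict.empty) (PySem.Dict.empty.insert 0 1)
  let ret := p_a.items.foldl (fun r a =>
    p_b.items.foldl (fun (r : Int × Int × Int) b =>
      if a.1 = b.1 then (r.1, r.2.1 + a.2 * b.2, r.2.2)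
      else if a.1 > b.1 then (r.1 + a.2 * b.2, r.2.1, r.2.2)
      else (r.1, r.2.1, r.2.2 + a.2 * b.2)) r)
    ((0, 0, 0) : Int × Int × Int)
  [ret.1, ret.2.1, ret.2.2]

-- ===== PORT B =====
-- Source B's helper dist: convolution via plain dict with t.get(..., 0)
def pvDist (dice : List (List (Int × Int))) : PySem.Dict Int Int :=
  dice.foldl (fun p d =>
    (PySem.Dict.ofList d).items.foldl (fun t kv =>
      p.items.foldl (fun t kv2 =>
        t.insert (kv.1 + kv2.1) (t.getD (kv.1 + kv2.1) 0 + kv2.2 * kv.2)) t)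
      PySem.Dict.empty) (PySem.Dict.empty.insert 0 1)

-- Source B's inner 'while j < len(ib) and ib[j][0] < ka' pointer advance (the consumed
-- prefix is dropped instead of indexed by j)
def pvSkip (ib : List (Int × Int)) (ka : Int) (below : Int) : List (Int × Int) × Int :=
  match ib with
  | [] => ([], below)
  | b :: t => if b.1 < ka then pvSkip t ka (below + b.2) else (b :: t, below)

-- Source B's 'for ka, va in ia' sweep accumulating wins and ties
def pvSweep (ia ib : List (Int × Int)) (below wins ties : Int) : Int × Int :=
  match ia with
  | [] => (wins, ties)
  | a :: rest =>
    let s := pvSkip ib a.1 below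
    let wins' := wins + a.2 * s.2
    let ties' :=
      match s.1 with
      | b :: _ => if b.1 = a.1 then ties + a.2 * b.2 else ties
      | [] => ties
    pvSweep rest s.1 s.2 wins' ties'

def calc_py_alt (A : List (List (Int × Int))) (B : List (List (Int × Int))) : List Int :=
  let pa := pvDist A
  let pb := pvDist B
  let ia := PySem.List.sorted pa.items (fun kv => kv.1)
  let ib := PySem.List.sorted pb.items (fun kv => kv.1)
  let wt := pvSweep ia ib 0 0 0
  let total := pa.values.sum * pb.values.sum
  [wt.1, wt.2, total - wt.1 - wt.2]

-- ===== PRECONDITION & SPEC =====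
def Spec_calc_py (A : List (List (Int × Int))) (B : List (List (Int × Int))) (out : List Int) : Prop := out = calc_py_alt A B
instance (A : List (List (Int × Int))) (B : List (List (Int × Int))) (out : List Int) : Decidable (Spec_calc_py A B out) := by unfold Spec_calc_py; infer_instance

-- ===== CLAIM (what is proved, stated in full; the proofs are below) =====
def Claim_equal_calc_py : Prop := ∀ (A : List (List (Int × Int))) (B : List (List (Int × Int))), Dom_calc_py A B → Spec_calc_py A B (calc_py A B)

-- ===== LEMMAS AND PROOFS =====

-- the three pairwise sums both programs compute
def pvG (a : Int × Int) (lb : List (Int × Int)) : Int :=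
  (lb.map (fun b => if b.1 < a.1 then a.2 * b.2 else 0)).sum
def pvE (a : Int × Int) (lb : List (Int × Int)) : Int :=
  (lb.map (fun b => if b.1 = a.1 then a.2 * b.2 else 0)).sum
def pvL (a : Int × Int) (lb : List (Int × Int)) : Int :=
  (lb.map (fun b => if a.1 < b.1 then a.2 * b.2 else 0)).sum

lemma pvModifyInsert (d : PySem.Dict Int Int) (k x : Int) :
    d.modify k 0 (fun w => w + x) = d.insert k (d.getD k 0 + x) := by
  simp [PySem.Dict.modify, PySem.Dict.getD_eq_get?_getD]

lemma pvDistEq (L : List (List (Int × Int))) :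
    L.foldl (fun p a =>
      (PySem.Dict.ofList a).items.foldl (fun t kv =>
        p.items.foldl (fun t kv2 => t.modify (kv.1 + kv2.1) 0 (fun w => w + kv2.2 * kv.2)) t)
        PySem.Dict.empty) (PySem.Dict.empty.insert 0 1) = pvDist L := by
  unfold pvDist
  simp only [pvModifyInsert]

lemma pvInnerA (a : Int × Int) (lb : List (Int × Int)) (r : Int × Int × Int) :
    lb.foldl (fun (r : Int × Int × Int) b =>
      if a.1 = b.1 then (r.1, r.2.1 + a.2 * b.2, r.2.2)
      else if a.1 > b.1 then (r.1 + a.2 * b.2, r.2.1, r.2.2)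
      else (r.1, r.2.1, r.2.2 + a.2 * b.2)) r
    = (r.1 + pvG a lb, r.2.1 + pvE a lb, r.2.2 + pvL a lb) := by
  induction lb generalizing r with
  | nil => simp [pvG, pvE, pvL]
  | cons b t ih =>
    simp only [List.foldl_cons, ih, pvG, pvE, pvL, List.map_cons, List.sum_cons, gt_iff_lt]
    generalize a.2 * b.2 = q
    split_ifs <;> simp [Prod.ext_iff] <;> omega

lemma pvOuterA (la lb : List (Int × Int)) (r : Int × Int × Int) :
    la.foldl (fun r a =>
      lb.foldl (fun (r : Int × Int × Int) b =>
        if a.1 = b.1 then (r.1, r.2.1 + a.2 * b.2, r.2.2)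
        else if a.1 > b.1 then (r.1 + a.2 * b.2, r.2.1, r.2.2)
        else (r.1, r.2.1, r.2.2 + a.2 * b.2)) r) r
    = (r.1 + (la.map (fun a => pvG a lb)).sum,
       r.2.1 + (la.map (fun a => pvE a lb)).sum,
       r.2.2 + (la.map (fun a => pvL a lb)).sum) := by
  induction la generalizing r with
  | nil => simp
  | cons a t ih =>
    simp only [List.foldl_cons]
    rw [pvInnerA, ih]
    simp only [List.map_cons, List.sum_cons, Prod.ext_iff]
    refine ⟨by ring, by ring, by ring⟩

-- pvSkip on a strictly key-sorted list: drops exactly the keys < ka, adds their values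
lemma pvSkipSpec (ib : List (Int × Int)) (ka below : Int)
    (hs : ib.Pairwise (fun x y => x.1 < y.1)) :
    pvSkip ib ka below =
      (ib.filter (fun b => !decide (b.1 < ka)),
       below + (ib.map (fun b => if b.1 < ka then b.2 else 0)).sum) := by
  induction ib generalizing below with
  | nil => simp [pvSkip]
  | cons b t ih =>
    rcases List.pairwise_cons.1 hs with ⟨hb, ht⟩
    by_cases h : b.1 < ka
    · rw [pvSkip]
      simp only [if_pos h]
      rw [ih (below + b.2) ht]
      simp [h, Prod.ext_iff]
      ring
    · rw [pvSkip]
      simp only [if_neg h]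
      have h1 : t.filter (fun b => !decide (b.1 < ka)) = t := by
        apply List.filter_eq_self.2
        intro x hx
        simp only [Bool.not_eq_true', decide_eq_false_iff_not, not_lt]
        have := hb x hx
        omega
      have h2 : (t.map (fun b => if b.1 < ka then b.2 else 0)).sum = 0 := by
        apply List.sum_eq_zero
        intro x hx
        rcases List.mem_map.1 hx with ⟨y, hy, rfl⟩
        have := hb y hy
        simp [show ¬ y.1 < ka from by omega]
      simp [h, h1, h2]

-- the if-sum of an = test over a sorted list is read off the head of the skipped suffix
lemma pvEqHead (ib : List (Int × Int)) (ka : Int)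
    (hs : ib.Pairwise (fun x y => x.1 < y.1)) :
    (ib.map (fun b => if b.1 = ka then b.2 else 0)).sum =
      (match ib.filter (fun b => !decide (b.1 < ka)) with
       | [] => 0
       | b :: _ => if b.1 = ka then b.2 else 0) := by
  induction ib with
  | nil => simp
  | cons b t ih =>
    rcases List.pairwise_cons.1 hs with ⟨hb, ht⟩
    by_cases h : b.1 < ka
    · have : ¬ b.1 = ka := by omega
      simp [h, this, ih ht]
    · have h2 : (t.map (fun b => if b.1 = ka then b.2 else 0)).sum = 0 := by
        apply List.sum_eq_zero
        intro x hx
        rcases List.mem_map.1 hx with ⟨y, hy, rfl⟩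
        have := hb y hy
        simp [show ¬ y.1 = ka from by omega]
      simp [h, h2]

-- splitting a '< y' if-sum at x ≤ y
lemma pvLtSplit (ib : List (Int × Int)) (x y : Int) (hxy : x < y) :
    (ib.map (fun b => if b.1 < x then b.2 else 0)).sum +
      ((ib.filter (fun b => !decide (b.1 < x))).map (fun b => if b.1 < y then b.2 else 0)).sum =
    (ib.map (fun b => if b.1 < y then b.2 else 0)).sum := by
  induction ib with
  | nil => simp
  | cons b t ih =>
    by_cases h : b.1 < x
    · simp [h, show b.1 < y by omega]
      omega
    · simp [h]
      omega

-- an '= y' if-sum is unchanged by dropping keys < x when x < y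
lemma pvEqSplit (ib : List (Int × Int)) (x y : Int) (hxy : x < y) :
    ((ib.filter (fun b => !decide (b.1 < x))).map (fun b => if b.1 = y then b.2 else 0)).sum =
    (ib.map (fun b => if b.1 = y then b.2 else 0)).sum := by
  induction ib with
  | nil => simp
  | cons b t ih =>
    by_cases h : b.1 < x
    · have : ¬ b.1 = y := by omega
      simp [h, this, ih]
    · simp [h, ih]

-- the sweep computes, for every a in ia, the below / tie if-sums over the ORIGINAL ib
lemma pvSweepSpec (ia : List (Int × Int)) :
    ∀ (ib : List (Int × Int)) (below wins ties : Int),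
    ia.Pairwise (fun x y => x.1 < y.1) → ib.Pairwise (fun x y => x.1 < y.1) →
    pvSweep ia ib below wins ties =
      (wins + (ia.map (fun a => a.2 * (below + (ib.map (fun b => if b.1 < a.1 then b.2 else 0)).sum))).sum,
       ties + (ia.map (fun a => a.2 * (ib.map (fun b => if b.1 = a.1 then b.2 else 0)).sum)).sum) := by
  induction ia with
  | nil => intro ib below wins ties _ _; simp [pvSweep]
  | cons a rest ih =>
    intro ib below wins ties hia hib
    rcases List.pairwise_cons.1 hia with ⟨ha, hrest⟩
    rw [pvSweep]
    rw [pvSkipSpec ib a.1 below hib]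
    rw [ih _ _ _ _ hrest (hib.filter _)]
    have hties : (match ib.filter (fun b => !decide (b.1 < a.1)) with
        | b :: _ => if b.1 = a.1 then ties + a.2 * b.2 else ties
        | [] => ties)
        = ties + a.2 * (ib.map (fun b => if b.1 = a.1 then b.2 else 0)).sum := by
      rw [pvEqHead ib a.1 hib]
      cases ib.filter (fun b => !decide (b.1 < a.1)) with
      | nil => simp
      | cons b l =>
        by_cases hb : b.1 = a.1 <;> simp [hb]
    have hw : rest.map (fun a' => a'.2 * (below + (ib.map (fun b => if b.1 < a.1 then b.2 else 0)).sum
            + ((ib.filter (fun b => !decide (b.1 < a.1))).map (fun b => if b.1 < a'.1 then b.2 else 0)).sum))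
        = rest.map (fun a' => a'.2 * (below + (ib.map (fun b => if b.1 < a'.1 then b.2 else 0)).sum)) := by
      apply List.map_congr_left
      intro a' ha'
      rw [← pvLtSplit ib a.1 a'.1 (ha a' ha')]
      ring
    have ht : rest.map (fun a' => a'.2 * ((ib.filter (fun b => !decide (b.1 < a.1))).map (fun b => if b.1 = a'.1 then b.2 else 0)).sum)
        = rest.map (fun a' => a'.2 * (ib.map (fun b => if b.1 = a'.1 then b.2 else 0)).sum) := by
      apply List.map_congr_left
      intro a' ha'
      rw [pvEqSplit ib a.1 a'.1 (ha a' ha')]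
    simp only [hties, hw, ht, List.map_cons, List.sum_cons, Prod.ext_iff]
    refine ⟨by ring, by ring⟩

-- keys stay Nodup through the convolution folds
lemma pvDistNodup (L : List (List (Int × Int))) : (pvDist L).keys.Nodup := by
  unfold pvDist
  refine List.foldlRecOn (motive := fun (d : PySem.Dict Int Int) => d.keys.Nodup) L _ ?_ ?_
  · exact PySem.Dict.nodup_keys_insert _ _ _ PySem.Dict.nodup_keys_empty
  · intro p _ d _
    refine List.foldlRecOn (motive := fun (d : PySem.Dict Int Int) => d.keys.Nodup) _ _ PySem.Dict.nodup_keys_empty ?_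
    intro t ht kv _
    refine List.foldlRecOn (motive := fun (d : PySem.Dict Int Int) => d.keys.Nodup) _ _ ht ?_
    intro t' ht' kv2 _
    exact PySem.Dict.nodup_keys_insert _ _ _ ht'

-- sorting the items of a Nodup-keyed dict by key gives strictly increasing keys
lemma pvSortedStrict (d : PySem.Dict Int Int) (h : d.keys.Nodup) :
    (PySem.List.sorted d.items (fun kv => kv.1)).Pairwise (fun x y => x.1 < y.1) := by
  have hle := PySem.List.sorted_pairwise d.items (fun kv => kv.1)
  have hperm : ((PySem.List.sorted d.items (fun kv => kv.1)).map (fun kv => kv.1)).Perm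
      (d.items.map (fun kv => kv.1)) := (PySem.List.sorted_perm d.items (fun kv => kv.1) false).map _
  have hkeys : d.items.map (fun kv => kv.1) = d.keys := by
    simp [PySem.Dict.keys]
  have hnd : ((PySem.List.sorted d.items (fun kv => kv.1)).map (fun kv => kv.1)).Nodup := by
    rw [hperm.nodup_iff, hkeys]; exact h
  have hne : (PySem.List.sorted d.items (fun kv => kv.1)).Pairwise (fun x y => x.1 ≠ y.1) :=
    List.pairwise_map.1 hnd
  exact (hle.and hne).imp (fun hp => lt_of_le_of_ne hp.1 hp.2)

-- pull a constant factor into an if-sum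
lemma pvMulIte (c : Int) (l : List (Int × Int)) (q : (Int × Int) → Prop) [DecidablePred q] :
    c * (l.map (fun b => if q b then b.2 else 0)).sum = (l.map (fun b => if q b then c * b.2 else 0)).sum := by
  rw [← List.sum_map_mul_left]
  apply congrArg
  apply List.map_congr_left
  intro b _
  split_ifs <;> simp

-- a double map-sum is invariant under permuting both lists
lemma pvSumPerm (l1 l2 la lb : List (Int × Int)) (h1 : l1.Perm la) (h2 : l2.Perm lb)
    (f : (Int × Int) → (Int × Int) → Int) :
    (l1.map (fun a => (l2.map (f a)).sum)).sum = (la.map (fun a => (lb.map (f a)).sum)).sum := by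
  have hin : ∀ a, (l2.map (f a)).sum = (lb.map (f a)).sum := fun a => (h2.map _).sum_eq
  simp only [hin]
  exact (h1.map _).sum_eq

-- the grand total splits in the three pairwise sums (trichotomy)
lemma pvTotal (la lb : List (Int × Int)) :
    (la.map (fun x => x.2)).sum * (lb.map (fun x => x.2)).sum
      = (la.map (fun a => pvG a lb)).sum + (la.map (fun a => pvE a lb)).sum
        + (la.map (fun a => pvL a lb)).sum := by
  have hpt : ∀ a : Int × Int, a.2 * (lb.map (fun x => x.2)).sum = pvG a lb + pvE a lb + pvL a lb := by
    intro a
    rw [← List.sum_map_mul_left]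
    unfold pvG pvE pvL
    rw [← PySem.List.sum_map_add_int, ← PySem.List.sum_map_add_int]
    apply congrArg
    apply List.map_congr_left
    intro b _
    rcases lt_trichotomy b.1 a.1 with h | h | h
    · simp [h, show ¬ b.1 = a.1 from by omega, show ¬ a.1 < b.1 from by omega]
    · simp [h]
    · simp [show ¬ b.1 < a.1 from by omega, show ¬ b.1 = a.1 from by omega, h]
  rw [← List.sum_map_mul_right]
  rw [List.map_congr_left (fun a _ => hpt a)]
  rw [PySem.List.sum_map_add_int la (fun a => pvG a lb + pvE a lb) (fun a => pvL a lb)]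
  rw [PySem.List.sum_map_add_int la (fun a => pvG a lb) (fun a => pvE a lb)]

-- ===== VERDICT (by name: the statement is the Claim_ definition above) =====
theorem calc_py_spec : Claim_equal_calc_py := by
  intro A B _
  unfold Spec_calc_py calc_py calc_py_alt
  simp only [pvDistEq]
  rw [pvOuterA]
  rw [pvSweepSpec _ _ 0 0 0 (pvSortedStrict _ (pvDistNodup A)) (pvSortedStrict _ (pvDistNodup B))]
  have hpa := PySem.List.sorted_perm (pvDist A).items (fun kv => kv.1) false
  have hpb := PySem.List.sorted_perm (pvDist B).items (fun kv => kv.1) false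
  have hW : ((PySem.List.sorted (pvDist A).items (fun kv => kv.1)).map
        (fun a => a.2 * ((PySem.List.sorted (pvDist B).items (fun kv => kv.1)).map
          (fun b => if b.1 < a.1 then b.2 else 0)).sum)).sum
      = ((pvDist A).items.map (fun a => pvG a (pvDist B).items)).sum := by
    rw [List.map_congr_left (fun a _ => pvMulIte a.2 _ (fun b => b.1 < a.1))]
    exact pvSumPerm _ _ _ _ hpa hpb (fun a b => if b.1 < a.1 then a.2 * b.2 else 0)
  have hT : ((PySem.List.sorted (pvDist A).items (fun kv => kv.1)).map
        (fun a => a.2 * ((PySem.List.sorted (pvDist B).items (fun kv => kv.1)).map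
          (fun b => if b.1 = a.1 then b.2 else 0)).sum)).sum
      = ((pvDist A).items.map (fun a => pvE a (pvDist B).items)).sum := by
    rw [List.map_congr_left (fun a _ => pvMulIte a.2 _ (fun b => b.1 = a.1))]
    exact pvSumPerm _ _ _ _ hpa hpb (fun a b => if b.1 = a.1 then a.2 * b.2 else 0)
  have hTot : (pvDist A).values.sum * (pvDist B).values.sum
      = ((pvDist A).items.map (fun a => pvG a (pvDist B).items)).sum
        + ((pvDist A).items.map (fun a => pvE a (pvDist B).items)).sum
        + ((pvDist A).items.map (fun a => pvL a (pvDist B).items)).sum := by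
    have hv : ∀ (d : PySem.Dict Int Int), d.values = d.items.map (fun x => x.2) := by
      intro d; simp [PySem.Dict.values]
    rw [hv, hv]
    exact pvTotal _ _
  simp only [zero_add]
  rw [hW, hT, hTot]
  simp only [List.cons.injEq, and_true]
  refine ⟨trivial, trivial, by ring⟩
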